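-- pv_equiv track=rewrite | github.com/0xMartin/SimpleApp-Pygame-framework | SimpleApp/gui/graph.py | buildGraphData
-- ===== SOURCE A (Python) =====
-- def buildGraphData(dataset_list):
--     data = []
--     l = len(dataset_list[0])
--     for i in range(l):
--         i_data = []
--         for ds in dataset_list:
--             if i < len(ds):
--                 i_data.append(ds[i])
--             else:
--                 i_data.append(0)
--         data.append(tuple(i_data))
--     return data
-- ===== SOURCE B (Python) =====
-- def buildGraphData(dataset_list):
--     l = len(dataset_list[0])
--     n = len(dataset_list)
--     grid = [[0] * n for _ in range(l)]
--     for j, ds in enumerate(dataset_list):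
--         for i in range(min(l, len(ds))):
--             grid[i][j] = ds[i]
--     return [tuple(row) for row in grid]
-- ===== Notes on version B (the rewrite author's own statement) =====
-- stated objective: alternative
-- what changed: B preallocates an l-by-n zero matrix and scatters each dataset into its column (column-major), instead of gathering row i across all datasets with an explicit padding branch.
import Mathlib
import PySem

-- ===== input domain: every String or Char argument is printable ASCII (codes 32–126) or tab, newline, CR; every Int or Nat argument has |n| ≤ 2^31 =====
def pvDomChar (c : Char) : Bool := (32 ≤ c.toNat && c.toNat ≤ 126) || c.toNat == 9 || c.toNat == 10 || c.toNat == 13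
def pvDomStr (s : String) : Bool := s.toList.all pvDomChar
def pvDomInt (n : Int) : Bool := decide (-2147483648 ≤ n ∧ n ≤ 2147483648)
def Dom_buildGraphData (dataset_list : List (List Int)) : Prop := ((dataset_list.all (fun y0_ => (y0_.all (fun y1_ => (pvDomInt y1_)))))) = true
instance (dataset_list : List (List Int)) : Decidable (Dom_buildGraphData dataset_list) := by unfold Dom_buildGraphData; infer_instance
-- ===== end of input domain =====

-- B scatters each dataset into its column of a preallocated zero matrix instead of
-- gathering each row index across datasets; same cost, alternative decomposition.
-- Python tuples in the result are encoded as List Int (tuple(row) is the identity here).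

-- ===== PORT A =====
def buildGraphData (dataset_list : List (List Int)) : List (List Int) :=
  -- data = []; l = len(dataset_list[0])  (IndexError on [] is excluded by Pre_)
  let l := ((PySem.List.pyGet? dataset_list 0).getD []).length
  -- for i in range(l): i_data = []; for ds in dataset_list: append ds[i] or 0; data.append(tuple(i_data))
  (List.range l).foldl
    (fun data i =>
      data ++ [dataset_list.foldl
        (fun i_data ds => i_data ++ [if i < ds.length then ds.getD i 0 else 0]) []])
    []

-- ===== PORT B =====
def buildGraphData_alt (dataset_list : List (List Int)) : List (List Int) :=
  -- l = len(dataset_list[0]); n = len(dataset_list)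
  let l := ((PySem.List.pyGet? dataset_list 0).getD []).length
  let n := dataset_list.length
  -- grid = [[0]*n for _ in range(l)]
  let grid0 := List.replicate l (List.replicate n (0 : Int))
  -- for j, ds in enumerate(dataset_list): for i in range(min(l, len(ds))): grid[i][j] = ds[i]
  let grid := (PySem.List.enumerate dataset_list).foldl
    (fun g p =>
      (List.range (min l p.2.length)).foldl
        (fun g i => g.modify i (fun row => row.set p.1.toNat (p.2.getD i 0))) g)
    grid0
  -- return [tuple(row) for row in grid]   (tuple is the identity in this encoding)
  grid.map (fun row => row)

-- ===== PRECONDITION & SPEC =====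
-- Pre_ excludes only the empty list, on which Python A raises IndexError (dataset_list[0]).
def Pre_buildGraphData (dataset_list : List (List Int)) : Prop := dataset_list ≠ []
instance (dataset_list : List (List Int)) : Decidable (Pre_buildGraphData dataset_list) := by unfold Pre_buildGraphData; infer_instance
def pvWitness_buildGraphData : List (List Int) := [[1, 2], [3]]

def Spec_buildGraphData (dataset_list : List (List Int)) (out : List (List Int)) : Prop := out = buildGraphData_alt dataset_list
instance (dataset_list : List (List Int)) (out : List (List Int)) : Decidable (Spec_buildGraphData dataset_list out) := by unfold Spec_buildGraphData; infer_instance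

-- ===== CLAIM (what is proved, stated in full; the proofs are below) =====
def Claim_equal_buildGraphData : Prop := ∀ (dataset_list : List (List Int)), Dom_buildGraphData dataset_list → Pre_buildGraphData dataset_list → Spec_buildGraphData dataset_list (buildGraphData dataset_list)

-- ===== LEMMAS AND PROOFS =====

-- the common closed form: row i is dataset_list with each ds replaced by ds.getD i 0
def pvTgt (dl : List (List Int)) (l : Nat) : List (List Int) :=
  (List.range l).map (fun i => dl.map (fun ds => ds.getD i 0))

theorem pv_fold_app {α β : Type} (L : List α) (f : α → β) (acc : List β) :
    L.foldl (fun acc x => acc ++ [f x]) acc = acc ++ L.map f := by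
  induction L generalizing acc with
  | nil => simp
  | cons x xs ih => simp [ih]

theorem pvA_eq_tgt (dl : List (List Int)) :
    buildGraphData dl = pvTgt dl ((PySem.List.pyGet? dl 0).getD []).length := by
  unfold buildGraphData pvTgt
  rw [pv_fold_app]
  simp only [List.nil_append]
  apply List.map_congr_left
  intro i _
  rw [pv_fold_app]
  simp only [List.nil_append]
  apply List.map_congr_left
  intro ds _
  split
  · rfl
  · rename_i h
    simp [List.getD, List.getElem?_eq_none (by omega : ds.length ≤ i)]

-- inner loop of B: folding modify over range m, characterised pointwise
theorem pv_inner (f : Nat → List Int → List Int) (m : Nat) (g : List (List Int)) (k : Nat) :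
    ((List.range m).foldl (fun g i => g.modify i (f i)) g)[k]? =
      if k < m then (f k) <$> g[k]? else g[k]? := by
  induction m generalizing k with
  | zero => simp
  | succ m ih =>
    rw [List.range_succ, List.foldl_append]
    simp only [List.foldl_cons, List.foldl_nil]
    rw [List.getElem?_modify, ih]
    rcases Nat.lt_trichotomy k m with h | h | h
    · simp [h, Nat.lt_succ_of_lt h, Nat.ne_of_gt h]
    · subst h
      simp
    · have h1 : ¬ k < m := by omega
      have h2 : ¬ k < m + 1 := by omega
      simp [h1, h2, Nat.ne_of_lt h]

-- one column scattered over the partially filled grid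
theorem pv_step (l j r : Nat) (ds : List Int) (pre : Nat → List Int)
    (hpre : ∀ i, (pre i).length = j) :
    ((List.range (min l ds.length)).foldl
        (fun g i => g.modify i (fun row => row.set j (ds.getD i 0)))
        ((List.range l).map (fun i => pre i ++ List.replicate (r + 1) 0)))
      = (List.range l).map (fun i => (pre i ++ [ds.getD i 0]) ++ List.replicate r 0) := by
  apply List.ext_getElem?
  intro k
  rw [pv_inner]
  by_cases hk : k < l
  · have hsome : ((List.range l).map (fun i => pre i ++ List.replicate (r + 1) (0:Int)))[k]? =
        some (pre k ++ List.replicate (r + 1) 0) := by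
      simp [List.getElem?_map, List.getElem?_range hk]
    by_cases hm : k < min l ds.length
    · have hkd : k < ds.length := lt_of_lt_of_le hm (Nat.min_le_right _ _)
      simp only [if_pos hm, hsome, Option.map_eq_map, Option.map_some]
      rw [List.getElem?_map, List.getElem?_range hk]
      rw [Option.map_some]
      simp only [Option.some_inj]
      rw [List.set_append, if_neg (by rw [hpre]; omega), hpre]
      simp [List.replicate_succ, List.append_assoc]
    · have hkd : ¬ k < ds.length := by omega
      simp only [if_neg hm, hsome]
      rw [List.getElem?_map, List.getElem?_range hk]
      rw [Option.map_some]
      simp only [Option.some_inj]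
      have : ds.getD k 0 = 0 := by
        simp [List.getD, List.getElem?_eq_none (by omega : ds.length ≤ k)]
      rw [this, List.replicate_succ]
      simp
  · have h1 : ((List.range l).map (fun i => pre i ++ List.replicate (r + 1) (0:Int)))[k]? = none := by
      simp [hk]
    have h2 : ((List.range l).map (fun i => (pre i ++ [ds.getD i 0]) ++ List.replicate r (0:Int)))[k]? = none := by
      simp [hk]
    have hm : ¬ k < min l ds.length := by omega
    simp [hm, h1]
    omega

-- the outer fold over enumerate, with the processed columns abstracted as pre
theorem pv_outer (rest : List (List Int)) (l : Nat) :
    ∀ (j : Nat) (pre : Nat → List Int), (∀ i, (pre i).length = j) →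
    ((PySem.List.enumerate rest (j : Int)).foldl
        (fun g p =>
          (List.range (min l p.2.length)).foldl
            (fun g i => g.modify i (fun row => row.set p.1.toNat (p.2.getD i 0))) g)
        ((List.range l).map (fun i => pre i ++ List.replicate rest.length 0)))
      = (List.range l).map (fun i => pre i ++ rest.map (fun ds => ds.getD i 0)) := by
  induction rest with
  | nil => intro j pre hpre; simp [PySem.List.enumerate]
  | cons ds rest ih =>
    intro j pre hpre
    rw [PySem.List.enumerate_cons]
    simp only [List.foldl_cons, List.length_cons]
    have htn : ((j : Int)).toNat = j := Int.toNat_natCast j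
    rw [htn, pv_step l j rest.length ds pre hpre]
    have : ((j : Int) + 1) = ((j + 1 : Nat) : Int) := by push_cast; ring
    rw [this, ih (j + 1) (fun i => pre i ++ [ds.getD i 0]) (by intro i; simp [hpre i])]
    apply List.map_congr_left
    intro i _
    simp

theorem pvB_eq_tgt (dl : List (List Int)) :
    buildGraphData_alt dl = pvTgt dl ((PySem.List.pyGet? dl 0).getD []).length := by
  unfold buildGraphData_alt pvTgt
  simp only [List.map_id']
  have h0 : List.replicate (((PySem.List.pyGet? dl 0).getD []).length) (List.replicate dl.length (0:Int))
      = (List.range (((PySem.List.pyGet? dl 0).getD []).length)).map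
          (fun i => (fun _ : Nat => ([] : List Int)) i ++ List.replicate dl.length 0) := by
    simp [List.map_const']
  rw [show ((0:Int)) = ((0 : Nat) : Int) by norm_num] at *
  rw [h0]
  exact pv_outer dl _ 0 (fun _ => []) (fun _ => rfl)

-- ===== VERDICT (by name: the statement is the Claim_ definition above) =====
theorem buildGraphData_spec : Claim_equal_buildGraphData := by
  intro dl _ _
  unfold Spec_buildGraphData
  rw [pvA_eq_tgt, pvB_eq_tgt]
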